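-- pv_equiv track=rewrite | github.com/sourceperl/pyHMI | tests/utils.py | to_16b_list
-- ===== SOURCE A (Python) =====
-- from typing import List, Optional
--
-- def to_16b_list(int_l: list, bit_length: int) -> List[int]:
--     """ Transform an int list of bit_length size into a 16 bits chunks list. """
--     _16b_l = []
--     for _int in int_l:
--         int_as_blocks = []
--         for _ in range(0, bit_length, 16):
--             int_as_blocks.append(_int & 0xffff)
--             _int >>= 16
--         _16b_l.extend(reversed(int_as_blocks))
--     return _16b_l
-- ===== SOURCE B (Python) =====
-- def to_16b_list(int_l: list, bit_length: int):
--     """ Transform an int list of bit_length size into a 16 bits chunks list. """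
--     n = len(range(0, bit_length, 16))
--     out = []
--     for v in int_l:
--         buf = (v % (1 << 16 * n)).to_bytes(2 * n, 'big')
--         out.extend(buf[i] * 256 + buf[i + 1] for i in range(0, 2 * n, 2))
--     return out
-- ===== Notes on version B (the rewrite author's own statement) =====
-- stated objective: alternative
-- what changed: B replaces A's per-int shift-and-mask loop plus reversed() with a single modular mask, big-endian byte serialization via int.to_bytes, and pairwise recombination of the byte buffer into 16-bit words.
import Mathlib
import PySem

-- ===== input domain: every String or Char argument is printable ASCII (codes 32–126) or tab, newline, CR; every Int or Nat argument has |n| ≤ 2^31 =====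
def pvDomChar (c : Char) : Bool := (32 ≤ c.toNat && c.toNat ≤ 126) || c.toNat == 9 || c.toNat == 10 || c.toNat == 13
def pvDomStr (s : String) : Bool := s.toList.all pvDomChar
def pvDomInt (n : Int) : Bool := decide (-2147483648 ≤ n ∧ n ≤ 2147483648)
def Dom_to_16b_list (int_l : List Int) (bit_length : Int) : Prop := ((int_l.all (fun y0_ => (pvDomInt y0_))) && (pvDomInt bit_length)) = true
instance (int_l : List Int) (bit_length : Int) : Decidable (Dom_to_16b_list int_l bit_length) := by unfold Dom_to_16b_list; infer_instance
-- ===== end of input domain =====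

-- B serializes each int (reduced modulo 2^(16n)) to big-endian bytes and recombines byte pairs,
-- instead of A's low-to-high shift-and-mask loop followed by reversal; alternative structure, same cost.

-- ===== PORT A =====
def to_16b_list (int_l : List Int) (bit_length : Int) : List Int :=
  int_l.foldl (fun acc x =>
    let p := (PySem.List.pyRange 0 bit_length 16).foldl
      (fun (st : List Int × Int) _ => (st.1 ++ [PySem.Int.band st.2 0xffff], st.2 >>> (16:Nat))) ([], x)
    acc ++ p.1.reverse) []

-- ===== PORT B =====
-- exact model of m.to_bytes(k, 'big') for the in-range nonnegative values B feeds it (0 ≤ m < 256^k)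
def pyToBytesBE : Nat → Int → List Int
  | 0, _ => []
  | k+1, m => pyToBytesBE k (m / 256) ++ [m % 256]

def to_16b_list_alt (int_l : List Int) (bit_length : Int) : List Int :=
  let n := (PySem.List.pyRange 0 bit_length 16).length
  int_l.foldl (fun out v =>
    let buf := pyToBytesBE (2 * n) (PySem.Int.mod v ((1:Int) <<< (16 * n)))
    -- buf[i] / buf[i+1]: indices produced by range(0, 2*n, 2) are always in range for the 2n-byte buffer
    out ++ (PySem.List.pyRange 0 (2*(n:Int)) 2).map
      (fun i => PySem.List.pyGetD buf i 0 * 256 + PySem.List.pyGetD buf (i+1) 0)) []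

-- ===== PRECONDITION & SPEC =====
def Spec_to_16b_list (int_l : List Int) (bit_length : Int) (out : List Int) : Prop := out = to_16b_list_alt int_l bit_length
instance (int_l : List Int) (bit_length : Int) (out : List Int) : Decidable (Spec_to_16b_list int_l bit_length out) := by unfold Spec_to_16b_list; infer_instance

-- ===== CLAIM (what is proved, stated in full; the proofs are below) =====
def Claim_equal_to_16b_list : Prop := ∀ (int_l : List Int) (bit_length : Int), Dom_to_16b_list int_l bit_length → Spec_to_16b_list int_l bit_length (to_16b_list int_l bit_length)

-- ===== LEMMAS AND PROOFS =====

-- big-endian base-65536 digits: the common reference value of one per-int chunk list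
def refHi : Nat → Int → List Int
  | 0, _ => []
  | n+1, v => refHi n (v / 65536) ++ [v % 65536]

-- intermediate view of B's pairing: consume the byte buffer two bytes at a time
def combinePairs : List Int → List Int
  | a :: b :: rest => (a * 256 + b) :: combinePairs rest
  | _ => []

theorem band_mask16 (v : Int) : PySem.Int.band v 0xffff = v % 65536 := by
  unfold PySem.Int.band
  have h16 : (65535 : Nat) = 2 ^ 16 - 1 := by norm_num
  by_cases hv : (0:Int) ≤ v
  · simp only [hv, if_pos, show (0:Int) ≤ 0xffff by norm_num]
    have : v.toNat &&& (65535:Int).toNat = v.toNat % 65536 := by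
      show v.toNat &&& 65535 = _
      rw [h16, Nat.and_two_pow_sub_one_eq_mod]
    rw [this]
    omega
  · simp only [hv, if_neg, not_false_iff, show (0:Int) ≤ 0xffff by norm_num, if_pos]
    have : (65535:Int).toNat &&& (-v - 1).toNat = (-v-1).toNat % 65536 := by
      rw [Nat.land_comm]
      show (-v-1).toNat &&& 65535 = _
      rw [h16, Nat.and_two_pow_sub_one_eq_mod]
    rw [this]
    omega

theorem shiftR16 (v : Int) : v >>> (16:Nat) = v / 65536 := by
  have := Int.shiftRight_eq_div_pow v 16
  norm_num at this
  exact this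

theorem combinePairs_append (xs ys : List Int) (h : xs.length % 2 = 0) :
    combinePairs (xs ++ ys) = combinePairs xs ++ combinePairs ys := by
  match xs with
  | [] => rfl
  | [a] => simp at h
  | a :: b :: rest =>
    simp only [List.cons_append, combinePairs]
    rw [combinePairs_append rest ys (by simp at h; omega)]

theorem length_pyToBytesBE (k : Nat) : ∀ m, (pyToBytesBE k m).length = k := by
  induction k with
  | zero => intro m; rfl
  | succ k ih => intro m; simp [pyToBytesBE, ih]

theorem bytes_pair (n : Nat) (m : Int) :
    pyToBytesBE (2 * (n+1)) m = pyToBytesBE (2 * n) (m / 65536) ++ [m / 256 % 256, m % 256] := by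
  have h2 : 2 * (n+1) = (2*n + 1) + 1 := by omega
  rw [h2]
  show pyToBytesBE (2*n+1) (m / 256) ++ [m % 256] = _
  show (pyToBytesBE (2*n) (m / 256 / 256) ++ [m / 256 % 256]) ++ [m % 256] = _
  have : m / 256 / 256 = m / 65536 := by omega
  rw [this]; simp

theorem combine_bytes (n : Nat) : ∀ (m : Int), combinePairs (pyToBytesBE (2 * n) m) = refHi n m := by
  induction n with
  | zero => intro m; rfl
  | succ n ih =>
    intro m
    rw [bytes_pair, combinePairs_append _ _ (by rw [length_pyToBytesBE]; omega), ih]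
    show refHi n (m / 65536) ++ [m / 256 % 256 * 256 + m % 256] = refHi (n+1) m
    have : m / 256 % 256 * 256 + m % 256 = m % 65536 := by omega
    rw [this]; rfl

theorem emod_mul_ediv (a b c : Int) (hb : 0 < b) (hc : 0 < c) :
    a % (b * c) / b = a / b % c := by
  have hbc : 0 < b * c := mul_pos hb hc
  have hr0 : 0 ≤ a % (b * c) := Int.emod_nonneg a (by positivity)
  have hr1 : a % (b * c) < b * c := Int.emod_lt_of_pos a hbc
  conv_rhs => rw [← Int.ediv_add_emod a (b * c)]
  rw [show b * c * (a / (b * c)) + a % (b * c) = a % (b*c) + b * (c * (a / (b*c))) by ring]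
  rw [Int.add_mul_ediv_left _ _ (by omega : b ≠ 0)]
  rw [Int.add_mul_emod_self_left]
  rw [Int.emod_eq_of_lt (Int.ediv_nonneg hr0 (by omega))
    (by rw [Int.ediv_lt_iff_lt_mul hb]; linarith [hr1, mul_comm b c])]

theorem refHi_emod (n : Nat) : ∀ (v : Int), refHi n (v % 2 ^ (16 * n)) = refHi n v := by
  induction n with
  | zero => intro v; rfl
  | succ n ih =>
    intro v
    have hP : (2:Int) ^ (16 * (n+1)) = 65536 * 2 ^ (16 * n) := by
      rw [show 16 * (n+1) = 16 + 16 * n by ring, pow_add]; norm_num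
    show refHi n (v % 2 ^ (16 * (n+1)) / 65536) ++ [v % 2 ^ (16 * (n+1)) % 65536] = _
    rw [hP, emod_mul_ediv v 65536 (2 ^ (16*n)) (by norm_num) (by positivity), ih]
    rw [Int.emod_emod_of_dvd v ⟨2 ^ (16*n), by ring⟩]
    rfl

theorem foldA_eq (l : List Int) : ∀ (v : Int) (blocks : List Int),
    (l.foldl (fun (st : List Int × Int) _ => (st.1 ++ [PySem.Int.band st.2 0xffff], st.2 >>> (16:Nat))) (blocks, v)).1
      = blocks ++ (refHi l.length v).reverse := by
  induction l with
  | nil => intro v blocks; simp [refHi]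
  | cons a l ih =>
    intro v blocks
    rw [List.foldl_cons, ih]
    show blocks ++ [PySem.Int.band v 0xffff] ++ (refHi l.length (v >>> (16:Nat))).reverse
        = blocks ++ (refHi (l.length + 1) v).reverse
    rw [band_mask16, shiftR16]
    show _ = blocks ++ ((refHi l.length (v / 65536)) ++ [v % 65536]).reverse
    simp

theorem evenPairs (n : Nat) : ∀ (xs : List Int), xs.length = 2*n →
    (List.range n).map (fun (k : Nat) => PySem.List.pyGetD xs (2*(k:Int)) 0 * 256 + PySem.List.pyGetD xs (2*(k:Int)+1) 0) = combinePairs xs := by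
  induction n with
  | zero =>
    intro xs h
    have : xs = [] := List.length_eq_zero_iff.mp (by omega)
    subst this; rfl
  | succ n ih =>
    intro xs h
    match xs, h with
    | a :: b :: rest, h =>
      have hlen : rest.length = 2 * n := by simp at h; omega
      rw [List.range_succ_eq_map, List.map_cons, List.map_map]
      have h0 : PySem.List.pyGetD (a :: b :: rest) (2*((0:Nat):Int)) 0 = a := by
        rw [PySem.List.pyGetD_eq_getElem _ _ (by norm_num) (by simp only [List.length_cons]; push_cast; omega)]
        norm_num
      have h1 : PySem.List.pyGetD (a :: b :: rest) (2*((0:Nat):Int)+1) 0 = b := by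
        rw [PySem.List.pyGetD_eq_getElem _ _ (by norm_num) (by simp only [List.length_cons]; push_cast; omega)]
        norm_num
      rw [h0, h1]
      show (a * 256 + b) :: _ = (a * 256 + b) :: combinePairs rest
      congr 1
      rw [← ih rest hlen]
      apply List.map_congr_left
      intro k hk
      have hkn : k < n := List.mem_range.mp hk
      simp only [Function.comp]
      have e1 : PySem.List.pyGetD (a :: b :: rest) (2*((k:Int)+1)) 0 = PySem.List.pyGetD rest (2*(k:Int)) 0 := by
        rw [PySem.List.pyGetD_eq_getElem _ _ (by omega) (by simp only [List.length_cons]; push_cast; omega),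
            PySem.List.pyGetD_eq_getElem _ _ (by omega) (by omega)]
        have t1 : (2*((k:Int)+1)).toNat = 2*k+1+1 := by omega
        have t2 : (2*(k:Int)).toNat = 2*k := by omega
        simp [t1, t2]
      have e2 : PySem.List.pyGetD (a :: b :: rest) (2*((k:Int)+1)+1) 0 = PySem.List.pyGetD rest (2*(k:Int)+1) 0 := by
        rw [PySem.List.pyGetD_eq_getElem _ _ (by omega) (by simp only [List.length_cons]; push_cast; omega),
            PySem.List.pyGetD_eq_getElem _ _ (by omega) (by omega)]
        have t1 : (2*((k:Int)+1)+1).toNat = 2*k+2+1 := by omega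
        have t2 : (2*(k:Int)+1).toNat = 2*k+1 := by omega
        simp [t1, t2]
      push_cast
      rw [e1, e2]

theorem pyRange_even (n : Nat) (f : Int → Int) :
    (PySem.List.pyRange 0 (2*(n:Int)) 2).map f = (List.range n).map (fun (k : Nat) => f (2*(k:Int))) := by
  rw [PySem.List.pyRange_of_pos _ _ (by norm_num)]
  have hm : (if (0:Int) < 2*(n:Int) then (((2*(n:Int)) - 0 + 2 - 1) / 2).toNat else 0) = n := by
    by_cases hn : 0 < n
    · rw [if_pos (by push_cast; omega)]; omega
    · rw [if_neg (by push_cast; omega)]; omega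
  rw [hm, List.map_map]
  apply List.map_congr_left
  intro k _
  simp

theorem chunk_eq (n : Nat) (v : Int) :
    (refHi n v).reverse.reverse =
      (PySem.List.pyRange 0 (2*(n:Int)) 2).map
        (fun i => PySem.List.pyGetD (pyToBytesBE (2 * n) (PySem.Int.mod v ((1:Int) <<< (16 * n)))) i 0 * 256
          + PySem.List.pyGetD (pyToBytesBE (2 * n) (PySem.Int.mod v ((1:Int) <<< (16 * n)))) (i+1) 0) := by
  rw [pyRange_even, evenPairs n _ (length_pyToBytesBE _ _), combine_bytes]
  have hpow : ((1:Int) <<< (16 * n)) = 2 ^ (16 * n) := by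
    show ((1 <<< (16 * n) : Nat) : Int) = 2 ^ (16 * n)
    rw [Nat.one_shiftLeft]
    push_cast
    rfl
  rw [PySem.Int.mod_eq_emod_of_pos (by rw [hpow]; positivity), hpow, refHi_emod]
  simp

theorem main_thm (int_l : List Int) (bit_length : Int) :
    to_16b_list int_l bit_length = to_16b_list_alt int_l bit_length := by
  unfold to_16b_list to_16b_list_alt
  have hf : (fun acc (x : Int) =>
      acc ++ ((PySem.List.pyRange 0 bit_length 16).foldl
        (fun (st : List Int × Int) _ => (st.1 ++ [PySem.Int.band st.2 0xffff], st.2 >>> (16:Nat))) ([], x)).1.reverse)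
      = fun (out : List Int) v =>
        let buf := pyToBytesBE (2 * (PySem.List.pyRange 0 bit_length 16).length)
          (PySem.Int.mod v ((1:Int) <<< (16 * (PySem.List.pyRange 0 bit_length 16).length)))
        out ++ (PySem.List.pyRange 0 (2*((PySem.List.pyRange 0 bit_length 16).length:Int)) 2).map
          (fun i => PySem.List.pyGetD buf i 0 * 256 + PySem.List.pyGetD buf (i+1) 0) := by
    funext acc x
    rw [foldA_eq]
    simp only [List.nil_append]
    rw [chunk_eq]
  simp only [hf]

-- ===== VERDICT (by name: the statement is the Claim_ definition above) =====
theorem to_16b_list_spec : Claim_equal_to_16b_list := by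
  intro int_l bit_length _
  unfold Spec_to_16b_list
  exact main_thm int_l bit_length
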